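/- GENERATED by farm/mkstatement.py from design/units.tsv (unit `start_decoder.F6d`) and the assertions of Vorbis/Spec/StartDecoderF6.lean — do not edit.
   THE STATEMENT of the proof unit `start_decoder.F6d`: segment F6d of `start_decoder` (11 instructions; entries 0x115809;
   exits 0x115809,0x115842; ranges 0x115809-0x115840)
   takes each of its entry assertions to one of its exit assertions (`Vorbis.Spec.StartDecoder.SegF6d`), given the contracts of its callees.
   What the names mean: Vorbis/Spec/Basic.lean (the shared hypotheses), Vorbis/Spec/StartDecoderF6.lean (the assertions). The theorem to prove:
   `theorem start_decoder_F6d_ok : Vorbis.Spec.start_decoder_F6d.Statement`. -/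
import Vorbis.Spec.StartDecoderF6
namespace Vorbis.Spec.start_decoder_F6d
open X86 X86.User Asan

/-- The statement of unit `start_decoder.F6d`. -/
def Statement : Prop :=
  ∀ (Lay : Layout) (_hLay : Lay.hi = 0x1000000) (μ : Microarch) (_hμ : UserX.MicroOK μ) (u₀ : State)
    (_hcode : HasCodeNat Lay u₀ Vorbis.L.start_decoder.entry Vorbis.Code.code_start_decoder.nat Vorbis.L.start_decoder.size)
    (_h_asan_load2_noabort : Asan.SmallCheck Lay μ Vorbis.WayInv (Vorbis.CodeOK u₀) [.rax, .rcx, .rdx] 2 Vorbis.L.__asan_load2_noabort.entry)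
    (_h_asan_store1_noabort : Asan.SmallCheck Lay μ Vorbis.WayInv (Vorbis.CodeOK u₀) [.rax, .rdx] 1 Vorbis.L.__asan_store1_noabort.entry),
    Vorbis.Spec.StartDecoder.SegF6d Lay μ u₀

end Vorbis.Spec.start_decoder_F6d
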